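-- pv_equiv track=rewrite | github.com/YuuuuBin2k5/MazePaint | src/Ui/ui.py | flat_to_matrix
-- ===== SOURCE A (Python) =====
-- def flat_to_matrix(flat_list, rows, cols):
--     """Chuyển đổi list phẳng thành matrix 2D"""
--     matrix = []
--     for i in range(rows):
--         row = []
--         for j in range(cols):
--             idx = i * cols + j
--             if idx < len(flat_list):
--                 row.append(flat_list[idx])
--             else:
--                 row.append(0)
--         matrix.append(row)
--     return matrix
-- ===== SOURCE B (Python) =====
-- def flat_to_matrix(flat_list, rows, cols):
--     """Pad-then-slice: build one padded buffer, then cut contiguous rows."""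
--     c = max(cols, 0)
--     n = max(rows, 0) * c
--     padded = list(flat_list[:n]) + [0] * (n - len(flat_list))
--     return [padded[r * c:(r + 1) * c] for r in range(rows)]
-- ===== Notes on version B (the rewrite author's own statement) =====
-- stated objective: simpler
-- what changed: Replaces the nested row/column loops with per-element bounds tests by building one padded buffer (truncate-or-pad to rows*cols) and then cutting it into rows by contiguous slicing.
import Mathlib
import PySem

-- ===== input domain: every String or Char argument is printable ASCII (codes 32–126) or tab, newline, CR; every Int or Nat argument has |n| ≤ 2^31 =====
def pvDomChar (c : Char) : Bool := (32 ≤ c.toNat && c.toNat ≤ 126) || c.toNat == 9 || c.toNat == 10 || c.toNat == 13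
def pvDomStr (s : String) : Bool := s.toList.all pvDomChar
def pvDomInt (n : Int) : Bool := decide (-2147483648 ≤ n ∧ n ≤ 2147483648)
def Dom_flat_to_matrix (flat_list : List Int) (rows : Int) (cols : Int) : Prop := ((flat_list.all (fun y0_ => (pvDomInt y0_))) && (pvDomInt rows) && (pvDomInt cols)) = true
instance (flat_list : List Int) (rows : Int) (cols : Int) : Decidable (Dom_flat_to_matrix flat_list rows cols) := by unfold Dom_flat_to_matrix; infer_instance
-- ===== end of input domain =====

-- ===== PORT A =====
-- B pads the flat list once and cuts rows by contiguous slicing instead of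
-- indexing element-by-element with an in-loop bounds test (objective: simpler).
def flat_to_matrix (flat_list : List Int) (rows : Int) (cols : Int) : List (List Int) :=
  (PySem.List.pyRange 0 rows 1).foldl (fun matrix i =>
    matrix ++ [(PySem.List.pyRange 0 cols 1).foldl (fun row j =>
      let idx := i * cols + j
      row ++ [if idx < (flat_list.length : Int) then
                -- idx is in range here, so pyGetD is exactly flat_list[idx]
                PySem.List.pyGetD flat_list idx 0
              else 0]) []]) []

-- ===== PORT B =====
def flat_to_matrix_alt (flat_list : List Int) (rows : Int) (cols : Int) : List (List Int) :=
  let c := max cols 0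
  let n := max rows 0 * c
  let padded := PySem.List.slice flat_list none (some n) ++
    List.replicate (n - (flat_list.length : Int)).toNat (0 : Int)
  (PySem.List.pyRange 0 rows 1).map (fun r =>
    PySem.List.slice padded (some (r * c)) (some ((r + 1) * c)))

-- ===== PRECONDITION & SPEC =====
def Spec_flat_to_matrix (flat_list : List Int) (rows : Int) (cols : Int) (out : List (List Int)) : Prop := out = flat_to_matrix_alt flat_list rows cols
instance (flat_list : List Int) (rows : Int) (cols : Int) (out : List (List Int)) : Decidable (Spec_flat_to_matrix flat_list rows cols out) := by unfold Spec_flat_to_matrix; infer_instance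

-- ===== CLAIM (what is proved, stated in full; the proofs are below) =====
def Claim_equal_flat_to_matrix : Prop := ∀ (flat_list : List Int) (rows : Int) (cols : Int), Dom_flat_to_matrix flat_list rows cols → Spec_flat_to_matrix flat_list rows cols (flat_to_matrix flat_list rows cols)

-- ===== LEMMAS AND PROOFS =====

-- one contiguous slice of the padded buffer is exactly A's r-th row
lemma row_slice (flat : List Int) (R C r : Nat) (hr : r < R) :
    ((flat.take (R*C) ++ List.replicate (R*C - flat.length) (0 : Int)).drop (r*C)).take C
    = (List.range C).map (fun j => if r*C+j < flat.length then flat.getD (r*C+j) 0 else 0) := by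
  have hlen : (flat.take (R*C) ++ List.replicate (R*C - flat.length) (0 : Int)).length = R*C := by
    simp; omega
  have hrc : r*C + C ≤ R*C := by
    have h1 : (r+1)*C ≤ R*C := Nat.mul_le_mul_right C hr
    have h2 : (r+1)*C = r*C + C := by ring
    omega
  apply List.ext_getElem
  · simp [hlen]; omega
  · intro j hj hj'
    have hjC : j < C := by simpa using hj'
    have hk : r*C + j < R*C := by omega
    simp only [List.getElem_take, List.getElem_drop, List.getElem_map, List.getElem_range]
    by_cases hfl : r*C + j < flat.length
    · have : r*C + j < (flat.take (R*C)).length := by simp; omega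
      rw [List.getElem_append_left this]
      simp [hfl, List.getD_eq_getElem?_getD]
    · have h1 : ¬ (r*C + j < (flat.take (R*C)).length) := by simp; omega
      rw [List.getElem_append_right (by omega : (flat.take (R*C)).length ≤ r*C + j)]
      simp [hfl]

-- ===== VERDICT (by name: the statement is the Claim_ definition above) =====
theorem flat_to_matrix_spec : Claim_equal_flat_to_matrix := by
  intro flat rows cols _
  unfold Spec_flat_to_matrix flat_to_matrix flat_to_matrix_alt
  have hc : max cols 0 = ((cols.toNat : Int)) := (Int.ofNat_toNat cols).symm
  have hr : max rows 0 = ((rows.toNat : Int)) := (Int.ofNat_toNat rows).symm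
  set R := rows.toNat
  set C := cols.toNat
  simp only [hc, hr, PySem.List.pyRange_one, zero_add, Int.sub_zero,
    PySem.List.foldl_append_singleton_eq_map, List.map_map, List.nil_append]
  apply List.map_congr_left
  intro r hrmem
  have hrR : r < R := List.mem_range.mp hrmem
  -- both sides: A's r-th row vs B's r-th slice
  by_cases hcpos : 0 < cols
  case neg =>
    have hcle : cols ≤ 0 := by omega
    -- cols ≤ 0 : every row is empty on both sides
    have h0 : List.range cols.toNat = [] := by simp [Int.toNat_of_nonpos hcle]
    have hC : ((C : Nat) : Int) = 0 := by
      show ((cols.toNat : Nat) : Int) = 0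
      simp [Int.toNat_of_nonpos hcle]
    have hsl : ∀ (xs : List Int), PySem.List.slice xs none (some (0 : Int)) = [] := by
      intro xs
      rw [PySem.List.slice_to]
      · simp
      · norm_num
    simp [h0, hC, hsl, PySem.List.slice_zero_start]
  case pos =>
    -- cols > 0 : cols = ↑C
    have hcC : cols = ((C : Nat) : Int) := (Int.toNat_of_nonneg (le_of_lt hcpos)).symm
    have hn : ((R : Int)) * ((C : Int)) = ((R*C : Nat) : Int) := by push_cast; ring
    have hslice : PySem.List.slice flat none (some (((R*C : Nat) : Int)))
        = flat.take (R*C) := PySem.List.slice_to_natCast flat (R*C)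
    have hrep : ((((R*C : Nat) : Int)) - (flat.length : Int)).toNat = R*C - flat.length :=
      Int.toNat_sub (R*C) flat.length
    have hstart : ((r : Int)) * ((C : Int)) = ((r*C : Nat) : Int) := by push_cast; ring
    have hstop : (((r : Int)) + 1) * ((C : Int)) = ((r*C : Nat) : Int) + ((C : Nat) : Int) := by
      push_cast; ring
    simp only [Function.comp, hcC, hn, hslice, hrep, hstart, hstop,
      PySem.List.slice_natCast_add]
    rw [row_slice flat R C r hrR]
    apply List.map_congr_left
    intro j hjmem
    simp only [Function.comp_apply]
    have hcast : ((r*C : Nat) : Int) + ((j : Nat) : Int) = (((r*C+j : Nat)) : Int) := by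
      push_cast; ring
    rw [hcast, PySem.List.pyGetD_natCast]
    by_cases hlt : r*C+j < flat.length
    · rw [if_pos hlt, if_pos (by exact_mod_cast hlt)]
    · rw [if_neg hlt, if_neg (by exact_mod_cast hlt)]
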